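-- pv_equiv track=rewrite | github.com/Hamiltonxx/pyalgorithms | algorithmic_thinking_puzzles/two_pointer/pairs.py | count_pairs_sum_target
-- ===== SOURCE A (Python) =====
-- def count_pairs_sum_target(nums, target):
--     n = len(nums)
--     nums.sort()
--     l,r = 0,n-1
--     cnt = 0
--     while l < r:
--         if nums[l] + nums[r] > target:
--             cnt += r - l
--             r -= 1
--         else:
--             l += 1
--     return cnt
-- ===== SOURCE B (Python) =====
-- def count_pairs_sum_target(nums, target):
--     nums.sort()
--     n = len(nums)
--     cnt = 0
--     for i in range(n):
--         lo, hi = i + 1, n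
--         while lo < hi:
--             mid = (lo + hi) // 2
--             if nums[i] + nums[mid] > target:
--                 hi = mid
--             else:
--                 lo = mid + 1
--         cnt += n - lo
--     return cnt
-- ===== Notes on version B (the rewrite author's own statement) =====
-- stated objective: alternative
-- what changed: Replaced the converging two-pointer scan with a per-element hand-written binary search for the first partner index whose sum with nums[i] strictly exceeds target, adding n - boundary per element; the in-place sort is kept.
import Mathlib
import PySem

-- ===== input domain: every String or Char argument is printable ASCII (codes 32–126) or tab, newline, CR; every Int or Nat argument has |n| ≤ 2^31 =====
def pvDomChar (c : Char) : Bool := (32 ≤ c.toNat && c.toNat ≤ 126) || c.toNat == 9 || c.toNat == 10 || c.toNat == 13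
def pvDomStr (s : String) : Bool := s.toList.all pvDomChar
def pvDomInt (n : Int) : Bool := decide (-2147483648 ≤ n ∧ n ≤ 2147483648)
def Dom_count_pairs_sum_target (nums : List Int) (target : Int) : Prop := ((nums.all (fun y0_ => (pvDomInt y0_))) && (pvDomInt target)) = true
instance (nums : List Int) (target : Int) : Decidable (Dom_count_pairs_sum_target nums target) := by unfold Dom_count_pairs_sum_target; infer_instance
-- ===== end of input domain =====

-- B replaces the converging two-pointer scan with a per-element binary search for the strict-sum
-- boundary (objective: alternative decomposition). Both A and B sort `nums` in place in Python;
-- the equivalence proved here is about the return value.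

-- ===== PORT A =====
-- while l < r: two-pointer scan over the sorted list
def loopA (s : List Int) (target : Int) (l r : Nat) (cnt : Int) : Int :=
  if l < r then
    if s.getD l 0 + s.getD r 0 > target then
      loopA s target l (r - 1) (cnt + ((r : Int) - (l : Int)))
    else
      loopA s target (l + 1) r cnt
  else cnt
termination_by r - l
decreasing_by all_goals omega

def count_pairs_sum_target (nums : List Int) (target : Int) : Int :=
  let s := PySem.List.sorted nums (fun x => x) false
  loopA s target 0 (s.length - 1) 0

-- ===== PORT B =====
-- hand-written binary search from Source B: first index in [lo, hi) whose element added to s[i] exceeds target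
def bsearchB (s : List Int) (target : Int) (i : Nat) (lo hi : Nat) : Nat :=
  if lo < hi then
    if s.getD i 0 + s.getD ((lo + hi) / 2) 0 > target then bsearchB s target i lo ((lo + hi) / 2)
    else bsearchB s target i ((lo + hi) / 2 + 1) hi
  else lo
termination_by hi - lo
decreasing_by all_goals omega

def count_pairs_sum_target_alt (nums : List Int) (target : Int) : Int :=
  let s := PySem.List.sorted nums (fun x => x) false
  let n := s.length
  (List.range n).foldl
    (fun cnt i => cnt + ((n : Int) - (bsearchB s target i (i + 1) n : Nat))) 0

-- ===== PRECONDITION & SPEC =====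
def Spec_count_pairs_sum_target (nums : List Int) (target : Int) (out : Int) : Prop := out = count_pairs_sum_target_alt nums target
instance (nums : List Int) (target : Int) (out : Int) : Decidable (Spec_count_pairs_sum_target nums target out) := by unfold Spec_count_pairs_sum_target; infer_instance

-- ===== CLAIM (what is proved, stated in full; the proofs are below) =====
def Claim_equal_count_pairs_sum_target : Prop := ∀ (nums : List Int) (target : Int), Dom_count_pairs_sum_target nums target → Spec_count_pairs_sum_target nums target (count_pairs_sum_target nums target)

-- ===== LEMMAS AND PROOFS =====

-- the number of index pairs l ≤ i < j ≤ r in s whose elements sum above t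
def Kcount (s : List Int) (t : Int) (l r : Nat) : Nat :=
  ∑ j ∈ Finset.Ico l (r + 1),
    ((Finset.Ico l j).filter (fun i => s.getD i 0 + s.getD j 0 > t)).card

lemma sorted_getD_mono (nums : List Int) (p q : Nat) (hpq : p ≤ q)
    (hq : q < (PySem.List.sorted nums (fun x => x) false).length) :
    (PySem.List.sorted nums (fun x => x) false).getD p 0 ≤
    (PySem.List.sorted nums (fun x => x) false).getD q 0 := by
  have hp : p < (PySem.List.sorted nums (fun x => x) false).length := lt_of_le_of_lt hpq hq
  rw [List.getD_eq_getElem _ 0 hp, List.getD_eq_getElem _ 0 hq]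
  exact PySem.List.sorted_id_getElem_mono nums hpq hq

lemma Kcount_zero (s : List Int) (t : Int) (l r : Nat) (h : r ≤ l) :
    Kcount s t l r = 0 := by
  unfold Kcount
  apply Finset.sum_eq_zero
  intro j hj
  have hj' := Finset.mem_Ico.mp hj
  have : Finset.Ico l j = ∅ := Finset.Ico_eq_empty (by omega)
  rw [this]
  simp

lemma loopA_eq (nums : List Int) (t : Int) :
    ∀ (k l r : Nat) (cnt : Int),
      r - l ≤ k → r < (PySem.List.sorted nums (fun x => x) false).length →
      loopA (PySem.List.sorted nums (fun x => x) false) t l r cnt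
        = cnt + (Kcount (PySem.List.sorted nums (fun x => x) false) t l r : Int) := by
  intro k
  induction k with
  | zero =>
    intro l r cnt hk hr
    rw [loopA, if_neg (by omega), Kcount_zero _ _ _ _ (by omega)]
    simp
  | succ k ih =>
    intro l r cnt hk hr
    by_cases hlr : l < r
    · rw [loopA, if_pos hlr]
      by_cases hp : (PySem.List.sorted nums (fun x => x) false).getD l 0
          + (PySem.List.sorted nums (fun x => x) false).getD r 0 > t
      · rw [if_pos hp, ih l (r - 1) _ (by omega) (by omega)]
        have e1 : Kcount (PySem.List.sorted nums (fun x => x) false) t l r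
            = Kcount (PySem.List.sorted nums (fun x => x) false) t l (r - 1)
              + ((Finset.Ico l r).filter (fun i =>
                  (PySem.List.sorted nums (fun x => x) false).getD i 0
                    + (PySem.List.sorted nums (fun x => x) false).getD r 0 > t)).card := by
          unfold Kcount
          have hr1 : r - 1 + 1 = r := by omega
          rw [hr1]
          exact Finset.sum_Ico_succ_top (by omega) _
        have e2 : (Finset.Ico l r).filter (fun i =>
              (PySem.List.sorted nums (fun x => x) false).getD i 0
                + (PySem.List.sorted nums (fun x => x) false).getD r 0 > t)
            = Finset.Ico l r := by
          apply Finset.filter_true_of_mem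
          intro i hi
          have hi' := Finset.mem_Ico.mp hi
          have h1 := sorted_getD_mono nums l i hi'.1 (by omega)
          omega
        rw [e1, e2, Nat.card_Ico]
        push_cast
        omega
      · rw [if_neg hp, ih (l + 1) r cnt (by omega) hr]
        have e1 : Kcount (PySem.List.sorted nums (fun x => x) false) t l r
            = Kcount (PySem.List.sorted nums (fun x => x) false) t (l + 1) r := by
          unfold Kcount
          have hstep : ∀ j ∈ Finset.Ico l (r + 1),
              ((Finset.Ico l j).filter (fun i =>
                (PySem.List.sorted nums (fun x => x) false).getD i 0
                  + (PySem.List.sorted nums (fun x => x) false).getD j 0 > t)).card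
              = ((Finset.Ico (l + 1) j).filter (fun i =>
                (PySem.List.sorted nums (fun x => x) false).getD i 0
                  + (PySem.List.sorted nums (fun x => x) false).getD j 0 > t)).card := by
            intro j hj
            have hj' := Finset.mem_Ico.mp hj
            have hPl : ¬ ((PySem.List.sorted nums (fun x => x) false).getD l 0
                + (PySem.List.sorted nums (fun x => x) false).getD j 0 > t) := by
              have hjr := sorted_getD_mono nums j r (by omega) hr
              omega
            congr 1
            ext i
            simp only [Finset.mem_filter, Finset.mem_Ico]
            constructor
            · rintro ⟨⟨h1, h2⟩, h3⟩
              rcases Nat.eq_or_lt_of_le h1 with h | h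
              · exact absurd h3 (h ▸ hPl)
              · exact ⟨⟨by omega, h2⟩, h3⟩
            · rintro ⟨⟨h1, h2⟩, h3⟩
              exact ⟨⟨by omega, h2⟩, h3⟩
          rw [Finset.sum_congr rfl hstep,
            Finset.sum_eq_sum_Ico_succ_bot (show l < r + 1 by omega)]
          have : Finset.Ico (l + 1) l = ∅ := Finset.Ico_eq_empty (by omega)
          rw [this]
          simp
        rw [e1]
    · rw [loopA, if_neg hlr, Kcount_zero _ _ _ _ (by omega)]
      simp

lemma bsearchB_spec (nums : List Int) (t : Int) (i : Nat) :
    ∀ (k lo hi : Nat),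
      hi - lo ≤ k → i < lo → lo ≤ hi →
      hi ≤ (PySem.List.sorted nums (fun x => x) false).length →
      (∀ j, i < j → j < lo → ¬ ((PySem.List.sorted nums (fun x => x) false).getD i 0 + (PySem.List.sorted nums (fun x => x) false).getD j 0 > t)) →
      (∀ j, hi ≤ j → j < (PySem.List.sorted nums (fun x => x) false).length → (PySem.List.sorted nums (fun x => x) false).getD i 0 + (PySem.List.sorted nums (fun x => x) false).getD j 0 > t) →
      i < bsearchB (PySem.List.sorted nums (fun x => x) false) t i lo hi ∧
      bsearchB (PySem.List.sorted nums (fun x => x) false) t i lo hi ≤ (PySem.List.sorted nums (fun x => x) false).length ∧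
      (∀ j, i < j → j < bsearchB (PySem.List.sorted nums (fun x => x) false) t i lo hi → ¬ ((PySem.List.sorted nums (fun x => x) false).getD i 0 + (PySem.List.sorted nums (fun x => x) false).getD j 0 > t)) ∧
      (∀ j, bsearchB (PySem.List.sorted nums (fun x => x) false) t i lo hi ≤ j → j < (PySem.List.sorted nums (fun x => x) false).length → (PySem.List.sorted nums (fun x => x) false).getD i 0 + (PySem.List.sorted nums (fun x => x) false).getD j 0 > t) := by
  intro k
  induction k with
  | zero =>
    intro lo hi hk hilo hlohi hhin hbelow habove
    rw [bsearchB, if_neg (by omega)]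
    exact ⟨hilo, by omega, fun j h1 h2 => hbelow j h1 h2,
      fun j hj1 hj2 => habove j (by omega) hj2⟩
  | succ k ih =>
    intro lo hi hk hilo hlohi hhin hbelow habove
    by_cases hlh : lo < hi
    · rw [bsearchB, if_pos hlh]
      by_cases hP : (PySem.List.sorted nums (fun x => x) false).getD i 0
          + (PySem.List.sorted nums (fun x => x) false).getD ((lo + hi) / 2) 0 > t
      · rw [if_pos hP]
        apply ih lo ((lo + hi) / 2) (by omega) hilo (by omega) (by omega) hbelow
        intro j hj1 hj2
        have := sorted_getD_mono nums ((lo + hi) / 2) j hj1 hj2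
        omega
      · rw [if_neg hP]
        apply ih ((lo + hi) / 2 + 1) hi (by omega) (by omega) (by omega) hhin _ habove
        intro j hj1 hj2
        by_cases hjlo : j < lo
        · exact hbelow j hj1 hjlo
        · have := sorted_getD_mono nums j ((lo + hi) / 2) (by omega) (by omega)
          omega
    · rw [bsearchB, if_neg hlh]
      exact ⟨hilo, by omega, fun j h1 h2 => hbelow j h1 h2,
        fun j hj1 hj2 => habove j (by omega) hj2⟩

lemma swap_sum (s : List Int) (t : Int) (n : Nat) :
    (∑ j ∈ Finset.Ico 0 n, ((Finset.Ico 0 j).filter (fun i => s.getD i 0 + s.getD j 0 > t)).card)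
      = ∑ i ∈ Finset.range n, ((Finset.Ico (i + 1) n).filter (fun j => s.getD i 0 + s.getD j 0 > t)).card := by
  have step1 : ∀ j ∈ Finset.range n,
      ((Finset.range j).filter (fun i => s.getD i 0 + s.getD j 0 > t)).card
        = ∑ i ∈ Finset.range n, if i < j ∧ s.getD i 0 + s.getD j 0 > t then 1 else 0 := by
    intro j hj
    have hjn := Finset.mem_range.mp hj
    rw [Finset.card_filter, Finset.range_eq_Ico,
      ← Finset.sum_Ico_consecutive _ (Nat.zero_le j) (le_of_lt hjn)]
    have h2 : ∑ i ∈ Finset.Ico j n, (if i < j ∧ s.getD i 0 + s.getD j 0 > t then 1 else 0) = 0 := by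
      apply Finset.sum_eq_zero
      intro i hi
      have hi' := Finset.mem_Ico.mp hi
      rw [if_neg (by omega)]
    have h3 : ∑ i ∈ Finset.Ico 0 j, (if i < j ∧ s.getD i 0 + s.getD j 0 > t then 1 else 0)
        = ∑ i ∈ Finset.Ico 0 j, (if s.getD i 0 + s.getD j 0 > t then 1 else 0) := by
      apply Finset.sum_congr rfl
      intro i hi
      have hi' := Finset.mem_Ico.mp hi
      rw [if_congr (and_iff_right hi'.2) rfl rfl]
    rw [h2, h3, add_zero]
  have step2 : ∀ i ∈ Finset.range n,
      (∑ j ∈ Finset.range n, if i < j ∧ s.getD i 0 + s.getD j 0 > t then 1 else 0)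
        = ((Finset.Ico (i + 1) n).filter (fun j => s.getD i 0 + s.getD j 0 > t)).card := by
    intro i hi
    have hin := Finset.mem_range.mp hi
    rw [Finset.card_filter, Finset.range_eq_Ico,
      ← Finset.sum_Ico_consecutive _ (Nat.zero_le (i + 1)) (show i + 1 ≤ n by omega)]
    have h2 : ∑ j ∈ Finset.Ico 0 (i + 1), (if i < j ∧ s.getD i 0 + s.getD j 0 > t then 1 else 0) = 0 := by
      apply Finset.sum_eq_zero
      intro j hj
      have hj' := Finset.mem_Ico.mp hj
      rw [if_neg (by omega)]
    have h3 : ∑ j ∈ Finset.Ico (i + 1) n, (if i < j ∧ s.getD i 0 + s.getD j 0 > t then 1 else 0)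
        = ∑ j ∈ Finset.Ico (i + 1) n, (if s.getD i 0 + s.getD j 0 > t then 1 else 0) := by
      apply Finset.sum_congr rfl
      intro j hj
      have hj' := Finset.mem_Ico.mp hj
      rw [if_congr (and_iff_right (by omega)) rfl rfl]
    rw [h2, h3, zero_add]
  rw [← Finset.range_eq_Ico, Finset.sum_congr rfl step1, Finset.sum_comm,
    Finset.sum_congr rfl step2]


-- ===== VERDICT (by name: the statement is the Claim_ definition above) =====
theorem count_pairs_sum_target_spec : Claim_equal_count_pairs_sum_target := by
  intro nums target _
  unfold Spec_count_pairs_sum_target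
  simp only [count_pairs_sum_target, count_pairs_sum_target_alt]
  cases hn : (PySem.List.sorted nums (fun x => x) false).length with
  | zero =>
    have hnil : PySem.List.sorted nums (fun x => x) false = [] :=
      List.length_eq_zero_iff.mp hn
    rw [hnil]
    rw [loopA]
    simp
  | succ m =>
    simp only [Nat.add_sub_cancel]
    -- A side
    rw [loopA_eq nums target (m + 1) 0 m 0 (by omega) (by rw [hn]; omega)]
    -- B side
    rw [PySem.List.foldl_add]
    have hsum : ((List.range (m + 1)).map
        (fun i => ((m + 1 : Nat) : Int)
          - (bsearchB (PySem.List.sorted nums (fun x => x) false) target i (i + 1) (m + 1) : Nat))).sum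
        = ∑ i ∈ Finset.range (m + 1),
            (((m + 1 : Nat) : Int)
              - (bsearchB (PySem.List.sorted nums (fun x => x) false) target i (i + 1) (m + 1) : Nat)) := rfl
    rw [hsum]
    have key : ∀ i ∈ Finset.range (m + 1),
        (((m + 1 : Nat) : Int)
          - (bsearchB (PySem.List.sorted nums (fun x => x) false) target i (i + 1) (m + 1) : Nat))
        = (((Finset.Ico (i + 1) (m + 1)).filter (fun j =>
            (PySem.List.sorted nums (fun x => x) false).getD i 0
              + (PySem.List.sorted nums (fun x => x) false).getD j 0 > target)).card : Int) := by
      intro i hi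
      have hin := Finset.mem_range.mp hi
      obtain ⟨hL1, hL2, hL3, hL4⟩ := bsearchB_spec nums target i (m + 1) (i + 1) (m + 1)
        (by omega) (by omega) (by omega) (le_of_eq hn.symm)
        (fun j h1 h2 => absurd h1 (by omega))
        (fun j h1 h2 => absurd h2 (by rw [hn]; omega))
      set L := bsearchB (PySem.List.sorted nums (fun x => x) false) target i (i + 1) (m + 1) with hL
      have hfe : (Finset.Ico (i + 1) (m + 1)).filter (fun j =>
            (PySem.List.sorted nums (fun x => x) false).getD i 0
              + (PySem.List.sorted nums (fun x => x) false).getD j 0 > target)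
          = Finset.Ico L (m + 1) := by
        ext j
        simp only [Finset.mem_filter, Finset.mem_Ico]
        constructor
        · rintro ⟨⟨h1, h2⟩, h3⟩
          constructor
          · by_contra hc
            exact hL3 j (by omega) (by omega) h3
          · exact h2
        · rintro ⟨h1, h2⟩
          exact ⟨⟨by omega, h2⟩, hL4 j h1 (by rw [hn]; omega)⟩
      rw [hfe, Nat.card_Ico]
      have hLle : L ≤ m + 1 := hn ▸ hL2
      push_cast [Nat.cast_sub hLle]
      ring
    rw [Finset.sum_congr rfl key]
    unfold Kcount
    rw [← Nat.cast_sum]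
    norm_cast
    rw [zero_add, zero_add]
    exact swap_sum (PySem.List.sorted nums (fun x => x) false) target (m + 1)
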